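-- pv_equiv track=rewrite | github.com/wgx112358/myltx_ssm | work/myltx-v1/scripts/self_forcing_data.py | split_uniform_spans
-- ===== SOURCE A (Python) =====
-- def split_uniform_spans(total_tokens: int, num_chunks: int) -> list[tuple[int, int]]:
--     if num_chunks <= 0:
--         return []
--     base, remainder = divmod(total_tokens, num_chunks)
--     spans: list[tuple[int, int]] = []
--     offset = 0
--     for idx in range(num_chunks):
--         size = base + (1 if idx < remainder else 0)
--         end = offset + size
--         spans.append((offset, end))
--         offset = end
--     return spans
-- ===== SOURCE B (Python) =====
-- def split_uniform_spans(total_tokens: int, num_chunks: int) -> list[tuple[int, int]]: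
--     if num_chunks <= 0:
--         return []
--     base, remainder = divmod(total_tokens, num_chunks)
--     def start(i: int) -> int:
--         return i * base + min(i, remainder)
--     return [(start(i), start(i + 1)) for i in range(num_chunks)]
-- ===== Notes on version B (the rewrite author's own statement) =====
-- stated objective: alternative
-- what changed: Each span boundary is computed independently in closed form start(i) = i*base + min(i, remainder), instead of threading a running offset through the loop.
import Mathlib
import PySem

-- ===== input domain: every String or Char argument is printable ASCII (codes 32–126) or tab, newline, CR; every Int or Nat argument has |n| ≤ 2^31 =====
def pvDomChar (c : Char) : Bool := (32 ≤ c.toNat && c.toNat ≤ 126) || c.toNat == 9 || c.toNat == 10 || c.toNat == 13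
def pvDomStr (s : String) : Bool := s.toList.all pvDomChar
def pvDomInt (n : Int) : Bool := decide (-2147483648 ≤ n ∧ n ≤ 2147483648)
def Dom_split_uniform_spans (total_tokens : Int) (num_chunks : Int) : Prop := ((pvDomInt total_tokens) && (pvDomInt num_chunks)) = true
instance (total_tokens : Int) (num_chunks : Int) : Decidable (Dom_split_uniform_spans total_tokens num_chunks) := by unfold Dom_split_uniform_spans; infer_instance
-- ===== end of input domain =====

-- B computes each boundary independently via the closed form start(i) = i*base + min(i, remainder)
-- instead of A's running offset; same cost, different decomposition ("alternative").

-- ===== PORT A =====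
def split_uniform_spans (total_tokens : Int) (num_chunks : Int) : List (Int × Int) :=
  if num_chunks ≤ 0 then []
  else
    let base := PySem.Int.floordiv total_tokens num_chunks
    let remainder := PySem.Int.mod total_tokens num_chunks
    let res := (PySem.List.pyRange 0 num_chunks 1).foldl
      (fun (st : List (Int × Int) × Int) idx =>
        let size := base + (if idx < remainder then 1 else 0)
        let e := st.2 + size
        (st.1 ++ [(st.2, e)], e)) ([], 0)
    res.1

-- ===== PORT B =====
def split_uniform_spans_alt (total_tokens : Int) (num_chunks : Int) : List (Int × Int) :=
  if num_chunks ≤ 0 then []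
  else
    let base := PySem.Int.floordiv total_tokens num_chunks
    let remainder := PySem.Int.mod total_tokens num_chunks
    (PySem.List.pyRange 0 num_chunks 1).map
      (fun i => (i * base + min i remainder, (i + 1) * base + min (i + 1) remainder))

-- ===== PRECONDITION & SPEC =====
def Spec_split_uniform_spans (total_tokens : Int) (num_chunks : Int) (out : List (Int × Int)) : Prop := out = split_uniform_spans_alt total_tokens num_chunks
instance (total_tokens : Int) (num_chunks : Int) (out : List (Int × Int)) : Decidable (Spec_split_uniform_spans total_tokens num_chunks out) := by unfold Spec_split_uniform_spans; infer_instance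

-- ===== CLAIM (what is proved, stated in full; the proofs are below) =====
def Claim_equal_split_uniform_spans : Prop := ∀ (total_tokens : Int) (num_chunks : Int), Dom_split_uniform_spans total_tokens num_chunks → Spec_split_uniform_spans total_tokens num_chunks (split_uniform_spans total_tokens num_chunks)

-- ===== LEMMAS AND PROOFS =====

-- loop invariant: starting the fold at index a with offset start(a) produces the
-- closed-form spans for indices [a, nc) appended to the accumulator, final offset start(nc)
theorem pv_loop_inv (base r : Int) (nc : Int) :
    ∀ (a : Int), 0 ≤ a → a ≤ nc → ∀ (acc : List (Int × Int)),
      (PySem.List.pyRange a nc 1).foldl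
        (fun (st : List (Int × Int) × Int) idx =>
          let size := base + (if idx < r then 1 else 0)
          let e := st.2 + size
          (st.1 ++ [(st.2, e)], e)) (acc, a * base + min a r)
      = (acc ++ (PySem.List.pyRange a nc 1).map
          (fun i => (i * base + min i r, (i + 1) * base + min (i + 1) r)),
         nc * base + min nc r) := by
  intro a ha hle
  induction h : (nc - a).toNat generalizing a with
  | zero =>
    intro acc
    have hba : nc ≤ a := by omega
    rw [PySem.List.pyRange_one_eq_nil hba]
    have : a = nc := by omega
    subst this
    simp
  | succ n ih =>
    intro acc
    have hab : a < nc := by omega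
    rw [PySem.List.pyRange_one_cons hab]
    simp only [List.foldl_cons, List.map_cons]
    have hstep : a * base + min a r + (base + (if a < r then 1 else 0))
        = (a + 1) * base + min (a + 1) r := by
      split_ifs with h' <;> [skip; skip] <;> · ring_nf; omega
    rw [hstep]
    have := ih (a + 1) (by omega) (by omega) (by omega)
      (acc ++ [(a * base + min a r, (a + 1) * base + min (a + 1) r)])
    simpa using this

-- ===== VERDICT (by name: the statement is the Claim_ definition above) =====
theorem split_uniform_spans_spec : Claim_equal_split_uniform_spans := by
  unfold Claim_equal_split_uniform_spans Spec_split_uniform_spans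
  intro t nc _
  unfold split_uniform_spans split_uniform_spans_alt
  by_cases hnc : nc ≤ 0
  · simp [hnc]
  · simp only [if_neg hnc]
    have hpos : 0 < nc := by omega
    have hr : 0 ≤ PySem.Int.mod t nc := by
      rw [PySem.Int.mod_eq_emod_of_pos hpos]
      exact Int.emod_nonneg t (by omega)
    have h0 : (0 : Int) * PySem.Int.floordiv t nc + min 0 (PySem.Int.mod t nc) = 0 := by
      simp [min_eq_left hr]
    have := pv_loop_inv (PySem.Int.floordiv t nc) (PySem.Int.mod t nc) nc 0
      le_rfl (le_of_lt hpos) []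
    rw [h0] at this
    simp only [this, List.nil_append]
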